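-- pv_equiv track=rewrite | github.com/atri45/Decopy | function/dataset.py | get_different_id
-- ===== SOURCE A (Python) =====
-- def get_different_id(original_text, replaced_text):
--     """
--     返回两个字符串中不同字符的位置。
--
--     :param original_text: 原始文本
--     :param replaced_text: 替换后的文本
--     :return: 一个包含所有不同字符位置的列表
--     """
--     wrong_ids = []
--
--     # 以最短的字符串长度为限制进行比较
--     min_length = min(len(original_text), len(replaced_text))
--     for i in range(min_length):
--         if original_text[i] != replaced_text[i]:
--             # 从1开始计数，所以需要+1
--             wrong_ids.append(i + 1)
--
--     # 如果一个文本比另一个文本长，则较长文本中的所有其他字符位置都被认为是不同的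
--     for i in range(min_length, max(len(original_text), len(replaced_text))):
--         wrong_ids.append(i + 1)
--
--     # 将wrong_ids转化为特定格式的字符串
--     return ', '.join(map(str, wrong_ids))
-- ===== SOURCE B (Python) =====
-- def get_different_id(original_text, replaced_text):
--     # Complement view: a position is "wrong" iff it is NOT a matching position.
--     same = {i + 1 for i, (a, b) in enumerate(zip(original_text, replaced_text)) if a == b}
--     n = max(len(original_text), len(replaced_text))
--     wrong_ids = sorted(set(range(1, n + 1)) - same)
--     return ', '.join(map(str, wrong_ids))
-- ===== Notes on version B (the rewrite author's own statement) =====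
-- stated objective: alternative
-- what changed: Instead of collecting mismatch positions directly in two loops, B computes the set of MATCHING positions from the zipped strings and returns the sorted set-difference of all positions 1..max(len) minus that set.
import Mathlib
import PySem

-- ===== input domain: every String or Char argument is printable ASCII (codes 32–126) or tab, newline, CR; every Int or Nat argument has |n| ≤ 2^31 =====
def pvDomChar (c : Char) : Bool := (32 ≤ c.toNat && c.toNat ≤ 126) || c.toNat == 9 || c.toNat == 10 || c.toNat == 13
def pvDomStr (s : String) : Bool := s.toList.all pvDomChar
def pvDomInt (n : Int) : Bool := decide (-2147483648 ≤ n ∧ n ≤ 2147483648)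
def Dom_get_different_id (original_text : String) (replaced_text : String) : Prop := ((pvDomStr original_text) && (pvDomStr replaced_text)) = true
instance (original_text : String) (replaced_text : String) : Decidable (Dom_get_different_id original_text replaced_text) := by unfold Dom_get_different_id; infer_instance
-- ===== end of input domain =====

-- B computes the set of MATCHING positions and returns the sorted complement within 1..max(len)
-- (objective: alternative formulation, same result).

-- ===== PORT A =====
def get_different_id (original_text : String) (replaced_text : String) : String :=
  let lo := original_text.toList
  let lr := replaced_text.toList
  let min_length : Int := min (PySem.Str.len original_text) (PySem.Str.len replaced_text)
  -- for i in range(min_length): if o[i] != r[i]: wrong_ids.append(i+1)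
  let wrong_ids : List Int := (PySem.List.pyRange 0 min_length 1).foldl
      (fun acc i => if PySem.List.pyGetD lo i ' ' ≠ PySem.List.pyGetD lr i ' ' then acc ++ [i + 1] else acc) []
  -- for i in range(min_length, max(len(o), len(r))): wrong_ids.append(i+1)
  let wrong_ids : List Int := (PySem.List.pyRange min_length (max (PySem.Str.len original_text) (PySem.Str.len replaced_text)) 1).foldl
      (fun acc i => acc ++ [i + 1]) wrong_ids
  PySem.Str.join ", " (wrong_ids.map PySem.Int.toStr)

-- ===== PORT B =====
def get_different_id_alt (original_text : String) (replaced_text : String) : String :=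
  let lo := original_text.toList
  let lr := replaced_text.toList
  -- same = {i + 1 for i, (a, b) in enumerate(zip(o, r)) if a == b}
  let same : PySem.Set Int := PySem.Set.ofList
      (((PySem.List.enumerate (lo.zip lr) 0).filter (fun p => p.2.1 == p.2.2)).map (fun p => p.1 + 1))
  let n : Int := max (PySem.Str.len original_text) (PySem.Str.len replaced_text)
  -- wrong_ids = sorted(set(range(1, n + 1)) - same)
  let wrong_ids : List Int := PySem.List.sorted
      (PySem.Set.diff (PySem.Set.ofList (PySem.List.pyRange 1 (n + 1) 1)) same) (fun x => x) false
  PySem.Str.join ", " (wrong_ids.map PySem.Int.toStr)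

-- ===== PRECONDITION & SPEC =====
def Spec_get_different_id (original_text : String) (replaced_text : String) (out : String) : Prop := out = get_different_id_alt original_text replaced_text
instance (original_text : String) (replaced_text : String) (out : String) : Decidable (Spec_get_different_id original_text replaced_text out) := by unfold Spec_get_different_id; infer_instance

-- ===== CLAIM =====
def Claim_equal_get_different_id : Prop := ∀ (original_text : String) (replaced_text : String), Dom_get_different_id original_text replaced_text → Spec_get_different_id original_text replaced_text (get_different_id original_text replaced_text)

-- ===== LEMMAS AND PROOFS =====

-- shifting a unit range by one
theorem map_add_one_pyRange (a b : Int) :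
    (PySem.List.pyRange a b 1).map (fun i => i + 1) = PySem.List.pyRange (a + 1) (b + 1) 1 := by
  rw [PySem.List.pyRange_one, PySem.List.pyRange_one, List.map_map]
  have : b + 1 - (a + 1) = b - a := by ring
  rw [this]
  apply List.map_congr_left
  intro k _
  simp
  ring

-- membership in B's `same` set, for an index inside the common prefix
theorem mem_same_iff (lo lr : List Char) (i : Int) (h0 : 0 ≤ i)
    (hi : i < min (lo.length : Int) (lr.length : Int)) :
    (i + 1) ∈ PySem.Set.ofList
        (((PySem.List.enumerate (lo.zip lr) 0).filter (fun p => p.2.1 == p.2.2)).map (fun p => p.1 + 1))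
      ↔ lo[i.toNat]'(by omega) = lr[i.toNat]'(by omega) := by
  rw [PySem.Set.mem_ofList, List.mem_map]
  constructor
  · rintro ⟨p, hp, hadd⟩
    rw [List.mem_filter] at hp
    obtain ⟨hmem, hbeq⟩ := hp
    rw [PySem.List.mem_enumerate_iff] at hmem
    obtain ⟨k, hk, rfl⟩ := hmem
    simp only [zero_add] at hadd hbeq
    have hki : (k : Int) = i := by omega
    have hkn : k = i.toNat := by omega
    subst hkn
    rw [List.getElem_zip] at hbeq
    simpa using hbeq
  · intro heq
    have hlen : i.toNat < (lo.zip lr).length := by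
      rw [List.length_zip]; omega
    refine ⟨(0 + (i.toNat : Int), (lo.zip lr)[i.toNat]), ?_, by push_cast; omega⟩
    rw [List.mem_filter]
    constructor
    · rw [PySem.List.mem_enumerate_iff]
      exact ⟨i.toNat, hlen, rfl⟩
    · rw [List.getElem_zip]
      simpa using heq

-- elements of `same` are at most min(len)
theorem mem_same_le (lo lr : List Char) (x : Int)
    (hx : x ∈ PySem.Set.ofList
        (((PySem.List.enumerate (lo.zip lr) 0).filter (fun p => p.2.1 == p.2.2)).map (fun p => p.1 + 1))) :
    x ≤ min (lo.length : Int) (lr.length : Int) := by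
  rw [PySem.Set.mem_ofList, List.mem_map] at hx
  obtain ⟨p, hp, rfl⟩ := hx
  rw [List.mem_filter] at hp
  rw [PySem.List.mem_enumerate_iff] at hp
  obtain ⟨⟨k, hk, rfl⟩, -⟩ := hp
  rw [List.length_zip] at hk
  simp only [zero_add]
  omega

theorem get_different_id_eq (original_text replaced_text : String) :
    get_different_id original_text replaced_text = get_different_id_alt original_text replaced_text := by
  unfold get_different_id get_different_id_alt
  simp only [PySem.Str.len_eq, PySem.List.foldl_append_singleton_eq_map]
  set lo := original_text.toList with hlo
  set lr := replaced_text.toList with hlr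
  set m : Int := min (lo.length : Int) (lr.length : Int) with hm
  set M : Int := max (lo.length : Int) (lr.length : Int) with hM
  set same : PySem.Set Int := PySem.Set.ofList
      (((PySem.List.enumerate (lo.zip lr) 0).filter (fun p => p.2.1 == p.2.2)).map (fun p => p.1 + 1))
    with hsame
  have hm0 : 0 ≤ m := by omega
  have hmM : m ≤ M := by omega
  -- A's first loop as filter-then-map
  have hloop1 : (PySem.List.pyRange 0 m 1).foldl
      (fun acc i => if PySem.List.pyGetD lo i ' ' ≠ PySem.List.pyGetD lr i ' ' then acc ++ [i + 1] else acc) ([] : List Int)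
    = ((PySem.List.pyRange 0 m 1).filter
        (fun i => decide (PySem.List.pyGetD lo i ' ' ≠ PySem.List.pyGetD lr i ' '))).map (fun i => i + 1) := by
    have h := PySem.List.foldl_append_if
      (fun i => decide (PySem.List.pyGetD lo i ' ' ≠ PySem.List.pyGetD lr i ' '))
      (fun i => i + 1) (PySem.List.pyRange 0 m 1) ([] : List Int)
    simpa using h
  rw [hloop1]
  -- the diff set is the literal filtered range (diff is filter; ofList of a nodup range is itself)
  have hdiff : PySem.Set.diff (PySem.Set.ofList (PySem.List.pyRange 1 (M + 1) 1)) same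
      = (PySem.List.pyRange 1 (M + 1) 1).filter (fun x => !(PySem.Set.contains same x)) := by
    rw [PySem.Set.ofList_eq_self_of_nodup _ (PySem.List.nodup_pyRange_one 1 (M + 1))]
    rfl
  -- the filtered range is strictly increasing, so sorted leaves it alone
  have hsorted : PySem.List.sorted
      (PySem.Set.diff (PySem.Set.ofList (PySem.List.pyRange 1 (M + 1) 1)) same) (fun x => x) false
      = (PySem.List.pyRange 1 (M + 1) 1).filter (fun x => !(PySem.Set.contains same x)) := by
    rw [hdiff]
    apply PySem.List.sorted_eq_self_of_pairwise
    exact ((PySem.List.pairwise_lt_pyRange_one 1 (M + 1)).sublist List.filter_sublist).imp le_of_lt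
  rw [hsorted]
  -- split the range at m + 1
  rw [PySem.List.pyRange_one_append 1 (m + 1) (M + 1) (by omega) (by omega), List.filter_append]
  -- tail: every position past m is absent from `same`
  have htail : (PySem.List.pyRange (m + 1) (M + 1) 1).filter (fun x => !(PySem.Set.contains same x))
      = PySem.List.pyRange (m + 1) (M + 1) 1 := by
    apply List.filter_eq_self.mpr
    intro x hx
    rw [PySem.List.mem_pyRange_one] at hx
    simp only [Bool.not_eq_eq_eq_not, Bool.not_true, ← Bool.not_eq_true, PySem.Set.contains_iff]
    intro hmem
    have := mem_same_le lo lr x hmem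
    omega
  -- head: filter through the +1 shift
  have hhead : (PySem.List.pyRange 1 (m + 1) 1).filter (fun x => !(PySem.Set.contains same x))
      = ((PySem.List.pyRange 0 m 1).filter
          (fun i => decide (PySem.List.pyGetD lo i ' ' ≠ PySem.List.pyGetD lr i ' '))).map (fun i => i + 1) := by
    have h01 : PySem.List.pyRange 1 (m + 1) 1 = (PySem.List.pyRange 0 m 1).map (fun i => i + 1) := by
      rw [map_add_one_pyRange 0 m]; norm_num
    rw [h01, List.filter_map]
    congr 1
    apply List.filter_congr
    intro i hi
    rw [PySem.List.mem_pyRange_one] at hi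
    obtain ⟨h0, hlt⟩ := hi
    have hmem := mem_same_iff lo lr i h0 (by omega)
    simp only [Function.comp]
    rw [PySem.List.pyGetD_eq_getElem lo ' ' h0 (by omega), PySem.List.pyGetD_eq_getElem lr ' ' h0 (by omega)]
    by_cases hc : lo[i.toNat]'(by omega) = lr[i.toNat]'(by omega)
    · have h1 : i + 1 ∈ same := hmem.mpr hc
      simp [hc, h1]
    · have h2 : i + 1 ∉ same := fun h => hc (hmem.mp h)
      simp [hc, h2]
  rw [htail, hhead, ← map_add_one_pyRange m M]

-- ===== VERDICT =====
theorem get_different_id_spec : Claim_equal_get_different_id := by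
  intro o r _
  exact get_different_id_eq o r
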